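-- pv_equiv track=rewrite | github.com/kimeloo/codetree-TILs | 240812/숫자의 순차적 이동/sequential-movement-of-numbers.py | nearMax
-- ===== SOURCE A (Python) =====
-- def check(location, n):
--     x, y = location
--     if x<0 or y<0 or x>=n or y>=n:
--         return False
--     else:
--         return True
--
-- def nearMax(location, numMap, n):
--     nearLocNum = []
--     dx = [-1,  0,  1, -1, 1, -1, 0, 1]    # 3*3에서 1, 2, 3, 4, 6, 7, 8, 9 위치
--     dy = [-1, -1, -1,  0, 0,  1, 1, 1]
--     x, y = location
--     for i in range(8):
--         newX = x + dx[i]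
--         newY = y + dy[i]
--         newLoc = (newX, newY)
--         if check(newLoc, n):
--             newNum = numMap[newY][newX]
--             nearLocNum.append([newNum, newLoc])
--     maxNum, maxLoc = sorted(nearLocNum, key=lambda x:-x[0])[0]
--     return maxLoc, maxNum
-- ===== SOURCE B (Python) =====
-- def nearMax(location, numMap, n):
--     x, y = location
--     best = None
--     for dx, dy in ((-1, -1), (0, -1), (1, -1), (-1, 0), (1, 0), (-1, 1), (0, 1), (1, 1)):
--         nx, ny = x + dx, y + dy
--         if 0 <= nx < n and 0 <= ny < n:
--             num = numMap[ny][nx]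
--             if best is None or best[0] < num:
--                 best = (num, (nx, ny))
--     return best[1], best[0]
-- ===== Notes on version B (the rewrite author's own statement) =====
-- stated objective: simpler
-- what changed: Replaces building a neighbor list and fully sorting it by negated value just to take the first element with a single fused loop that tracks the running first-encountered maximum (strict comparison preserves the stable sort's tie-breaking).
import Mathlib
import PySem

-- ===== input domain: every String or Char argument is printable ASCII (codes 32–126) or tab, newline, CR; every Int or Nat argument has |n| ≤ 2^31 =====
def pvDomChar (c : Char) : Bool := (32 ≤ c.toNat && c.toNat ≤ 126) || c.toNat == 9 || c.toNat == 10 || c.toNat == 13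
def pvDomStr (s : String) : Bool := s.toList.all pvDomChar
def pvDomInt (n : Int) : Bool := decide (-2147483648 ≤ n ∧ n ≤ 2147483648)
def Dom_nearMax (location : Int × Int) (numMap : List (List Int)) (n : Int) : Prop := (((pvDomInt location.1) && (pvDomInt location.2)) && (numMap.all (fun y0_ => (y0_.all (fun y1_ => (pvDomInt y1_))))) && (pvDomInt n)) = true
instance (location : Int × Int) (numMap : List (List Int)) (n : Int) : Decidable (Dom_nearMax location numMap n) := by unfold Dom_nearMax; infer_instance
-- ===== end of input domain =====

-- B replaces A's collect-then-sort-by-negated-value-then-take-first with one fused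
-- running-maximum loop over the same neighbor order (objective: simpler).


-- ===== PORT A =====
def check (location : Int × Int) (n : Int) : Bool :=
  if location.1 < 0 ∨ location.2 < 0 ∨ location.1 ≥ n ∨ location.2 ≥ n then false else true

def dxA : List Int := [-1, 0, 1, -1, 1, -1, 0, 1]
def dyA : List Int := [-1, -1, -1, 0, 0, 1, 1, 1]

def nearMax (location : Int × Int) (numMap : List (List Int)) (n : Int) : (Int × Int) × Int :=
  let x := location.1
  let y := location.2
  let nearLocNum : List (Int × (Int × Int)) :=
    (PySem.List.pyRange 0 8 1).foldl (fun acc i =>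
      let newX := x + PySem.List.pyGetD dxA i 0
      let newY := y + PySem.List.pyGetD dyA i 0
      if check (newX, newY) n then
        -- numMap[newY][newX]: Pre_ guarantees both lookups succeed, so pyGetD's default is never taken
        let newNum := PySem.List.pyGetD (PySem.List.pyGetD numMap newY []) newX 0
        acc ++ [(newNum, (newX, newY))]
      else acc) []
  match PySem.List.sorted nearLocNum (fun p => -p.1) false with
  | (maxNum, maxLoc) :: _ => (maxLoc, maxNum)
  | [] => ((0, 0), 0)   -- Python raises IndexError here; excluded by Pre_

-- ===== PORT B =====
-- the eight neighbor offsets, in A's dx/dy order (also used by Pre_)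
def pvOffsets : List (Int × Int) := [(-1, -1), (0, -1), (1, -1), (-1, 0), (1, 0), (-1, 1), (0, 1), (1, 1)]

def nearMax_alt (location : Int × Int) (numMap : List (List Int)) (n : Int) : (Int × Int) × Int :=
  let x := location.1
  let y := location.2
  let best : Option (Int × (Int × Int)) :=
    pvOffsets.foldl (fun best d =>
      let nx := x + d.1
      let ny := y + d.2
      if 0 ≤ nx ∧ nx < n ∧ 0 ≤ ny ∧ ny < n then
        let num := PySem.List.pyGetD (PySem.List.pyGetD numMap ny []) nx 0
        match best with
        | none => some (num, (nx, ny))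
        | some b => if b.1 < num then some (num, (nx, ny)) else best
      else best) none
  match best with
  | some b => (b.2, b.1)
  | none => ((0, 0), 0)   -- Python raises TypeError here; excluded by Pre_

-- ===== PRECONDITION & SPEC =====
-- Pre_ excludes exactly the inputs where the Python A raises: no neighbor in bounds of n
-- (IndexError on the empty sorted list), or an in-bounds neighbor whose row/column is missing
-- from numMap (IndexError on numMap[newY][newX]).
def Pre_nearMax (location : Int × Int) (numMap : List (List Int)) (n : Int) : Prop :=
  (∃ d ∈ pvOffsets, 0 ≤ location.1 + d.1 ∧ location.1 + d.1 < n ∧ 0 ≤ location.2 + d.2 ∧ location.2 + d.2 < n) ∧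
  (∀ d ∈ pvOffsets, (0 ≤ location.1 + d.1 ∧ location.1 + d.1 < n ∧ 0 ≤ location.2 + d.2 ∧ location.2 + d.2 < n) →
    (PySem.List.pyGet? numMap (location.2 + d.2)).isSome ∧
    (PySem.List.pyGet? ((PySem.List.pyGet? numMap (location.2 + d.2)).getD []) (location.1 + d.1)).isSome)
instance (location : Int × Int) (numMap : List (List Int)) (n : Int) : Decidable (Pre_nearMax location numMap n) := by unfold Pre_nearMax; infer_instance

def pvWitness_nearMax : (Int × Int) × List (List Int) × Int := ((1, 1), [[1, 2, 3], [4, 5, 6], [7, 8, 9]], 3)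

def Spec_nearMax (location : Int × Int) (numMap : List (List Int)) (n : Int) (out : (Int × Int) × Int) : Prop := out = nearMax_alt location numMap n
instance (location : Int × Int) (numMap : List (List Int)) (n : Int) (out : (Int × Int) × Int) : Decidable (Spec_nearMax location numMap n out) := by unfold Spec_nearMax; infer_instance

-- ===== CLAIM (what is proved, stated in full; the proofs are below) =====
def Claim_equal_nearMax : Prop := ∀ (location : Int × Int) (numMap : List (List Int)) (n : Int), Dom_nearMax location numMap n → Pre_nearMax location numMap n → Spec_nearMax location numMap n (nearMax location numMap n)

-- ===== LEMMAS AND PROOFS =====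

-- the running-first-maximum step (B's update rule, = PySem.List.max?'s fold step for key = fst)
def stepB (m : Option (Int × (Int × Int))) (x : Int × (Int × Int)) : Option (Int × (Int × Int)) :=
  match m with
  | none => some x
  | some y => if y.1 < x.1 then some x else some y

theorem insertBy_head? {α : Type} (before : α → α → Bool) (x : α) (acc : List α) :
    (PySem.List.insertBy before x acc).head? =
      some (match acc.head? with | none => x | some y => if before x y then x else y) := by
  cases acc with
  | nil => rfl
  | cons y ys => simp [PySem.List.insertBy]; split <;> simp

theorem foldl_insertBy_head? {α : Type} (before : α → α → Bool) (l : List α) (acc : List α) :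
    (l.foldl (fun acc x => PySem.List.insertBy before x acc) acc).head? =
      l.foldl (fun m x => some (match m with | none => x | some y => if before x y then x else y))
        acc.head? := by
  induction l generalizing acc with
  | nil => rfl
  | cons d t ih =>
    simp only [List.foldl]
    rw [ih, insertBy_head?]

theorem sorted_head?_eq_foldl_stepB (l : List (Int × (Int × Int))) :
    (PySem.List.sorted l (fun p => -p.1) false).head? = l.foldl stepB none := by
  rw [PySem.List.sorted_eq_foldl_insertBy, foldl_insertBy_head?]
  rw [show (([] : List (Int × (Int × Int))).head?) = none from rfl]
  refine List.foldl_ext _ _ none (fun m x _ => ?_)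
  cases m with
  | none => rfl
  | some y => by_cases h : y.1 < x.1 <;> simp [stepB, h, neg_lt_neg_iff]

theorem foldl_collect_stepB (cond : Int × Int → Bool) (v : Int × Int → Int × (Int × Int))
    (L : List (Int × Int)) (acc : List (Int × (Int × Int))) :
    L.foldl (fun best d => if cond d then stepB best (v d) else best) (acc.foldl stepB none)
      = (L.foldl (fun a d => if cond d then a ++ [v d] else a) acc).foldl stepB none := by
  induction L generalizing acc with
  | nil => rfl
  | cons d t ih =>
    simp only [List.foldl]
    by_cases h : cond d
    · simp only [h, if_true]
      have : stepB (acc.foldl stepB none) (v d) = ((acc ++ [v d]).foldl stepB none) := by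
        rw [List.foldl_append]; rfl
      rw [this, ih]
    · simp only [h]
      exact ih acc

theorem check_eq (a b n : Int) :
    check (a, b) n = decide (0 ≤ a ∧ a < n ∧ 0 ≤ b ∧ b < n) := by
  simp only [check]
  by_cases h : 0 ≤ a ∧ a < n ∧ 0 ≤ b ∧ b < n
  · rw [if_neg (by omega)]
    simp [h]
  · rw [if_pos (by omega)]
    simp [h]

-- A's neighbor list, as a fold over the shared offset list
def collectA (x y : Int) (numMap : List (List Int)) (n : Int) : List (Int × (Int × Int)) :=
  pvOffsets.foldl (fun a d =>
    if check (x + d.1, y + d.2) n then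
      a ++ [(PySem.List.pyGetD (PySem.List.pyGetD numMap (y + d.2) []) (x + d.1) 0, (x + d.1, y + d.2))]
    else a) []

theorem nearMax_eq_collect (x y : Int) (numMap : List (List Int)) (n : Int) :
    nearMax (x, y) numMap n =
      match PySem.List.sorted (collectA x y numMap n) (fun p => -p.1) false with
      | (maxNum, maxLoc) :: _ => (maxLoc, maxNum)
      | [] => ((0, 0), 0) := by
  have hr : PySem.List.pyRange 0 8 1 = [0, 1, 2, 3, 4, 5, 6, 7] := by decide
  have hx0 : PySem.List.pyGetD dxA 0 0 = -1 := by decide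
  have hx1 : PySem.List.pyGetD dxA 1 0 = 0 := by decide
  have hx2 : PySem.List.pyGetD dxA 2 0 = 1 := by decide
  have hx3 : PySem.List.pyGetD dxA 3 0 = -1 := by decide
  have hx4 : PySem.List.pyGetD dxA 4 0 = 1 := by decide
  have hx5 : PySem.List.pyGetD dxA 5 0 = -1 := by decide
  have hx6 : PySem.List.pyGetD dxA 6 0 = 0 := by decide
  have hx7 : PySem.List.pyGetD dxA 7 0 = 1 := by decide
  have hy0 : PySem.List.pyGetD dyA 0 0 = -1 := by decide
  have hy1 : PySem.List.pyGetD dyA 1 0 = -1 := by decide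
  have hy2 : PySem.List.pyGetD dyA 2 0 = -1 := by decide
  have hy3 : PySem.List.pyGetD dyA 3 0 = 0 := by decide
  have hy4 : PySem.List.pyGetD dyA 4 0 = 0 := by decide
  have hy5 : PySem.List.pyGetD dyA 5 0 = 1 := by decide
  have hy6 : PySem.List.pyGetD dyA 6 0 = 1 := by decide
  have hy7 : PySem.List.pyGetD dyA 7 0 = 1 := by decide
  simp only [nearMax, collectA, hr, pvOffsets, List.foldl,
    hx0, hx1, hx2, hx3, hx4, hx5, hx6, hx7, hy0, hy1, hy2, hy3, hy4, hy5, hy6, hy7]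

theorem nearMax_alt_eq_fused (x y : Int) (numMap : List (List Int)) (n : Int) :
    nearMax_alt (x, y) numMap n =
      match pvOffsets.foldl (fun best d =>
          if check (x + d.1, y + d.2) n then
            stepB best (PySem.List.pyGetD (PySem.List.pyGetD numMap (y + d.2) []) (x + d.1) 0,
              (x + d.1, y + d.2))
          else best) none with
      | some b => (b.2, b.1)
      | none => ((0, 0), 0) := by
  simp only [nearMax_alt]
  congr 1
  apply congrFun
  apply congrFun
  apply congrArg
  funext best d
  rw [check_eq]
  by_cases h : 0 ≤ x + d.1 ∧ x + d.1 < n ∧ 0 ≤ y + d.2 ∧ y + d.2 < n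
  · rw [if_pos h, if_pos (by simp [h])]
    cases best <;> rfl
  · rw [if_neg h, if_neg (by simp [h])]

theorem nearMax_eq_alt (location : Int × Int) (numMap : List (List Int)) (n : Int) :
    nearMax location numMap n = nearMax_alt location numMap n := by
  obtain ⟨x, y⟩ := location
  rw [nearMax_eq_collect, nearMax_alt_eq_fused]
  have hfuse := foldl_collect_stepB
    (fun d => check (x + d.1, y + d.2) n)
    (fun d => (PySem.List.pyGetD (PySem.List.pyGetD numMap (y + d.2) []) (x + d.1) 0,
      (x + d.1, y + d.2)))
    pvOffsets []
  have h2 : pvOffsets.foldl (fun best d =>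
        if check (x + d.1, y + d.2) n then
          stepB best (PySem.List.pyGetD (PySem.List.pyGetD numMap (y + d.2) []) (x + d.1) 0,
            (x + d.1, y + d.2))
        else best) none
      = (PySem.List.sorted (collectA x y numMap n) (fun p => -p.1) false).head? := by
    rw [sorted_head?_eq_foldl_stepB]
    exact hfuse
  rw [h2]
  cases PySem.List.sorted (collectA x y numMap n) (fun p => -p.1) false with
  | nil => rfl
  | cons m t => obtain ⟨num, lo⟩ := m; rfl

-- ===== VERDICT (by name: the statement is the Claim_ definition above) =====
theorem nearMax_spec : Claim_equal_nearMax := by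
  intro location numMap n _ _
  show _ = _
  exact nearMax_eq_alt location numMap n
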